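-- pv_equiv track=rewrite | github.com/Aswin271/Placements | new accenture/magical_num.py | magical_num
-- ===== SOURCE A (Python) =====
-- def magical_num(num):
--     """This is a function which will convert the number into binary and find the sum
--     if the sum is even its not magical and if odd magical and while add if the bit is zero
--     it  becomes one and if its one it becomes 2"""
--     if num == 0:
--         return 0
--     sum = 0
--     binary_num = bin(num).replace("0b","")
--     for i in range(len(binary_num)):
--         if binary_num[i]=='1':
--             sum = sum + 2
--         elif binary_num[i]=='0':
--             sum = sum + 1
--     if sum % 2 == 0:
--         return "Not Magical"
--     else:
--         return "Magical"
-- ===== SOURCE B (Python) =====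
-- def magical_num(num):
--     if num == 0:
--         return 0
--     zeros = num.bit_length() - bin(num).count('1')
--     return "Magical" if zeros % 2 else "Not Magical"
-- ===== Notes on version B (the rewrite author's own statement) =====
-- stated objective: simpler
-- what changed: Replaces the per-character weighted-sum loop over the binary string with an aggregate computation: the weighted sum's parity equals the parity of the number of zero bits, computed as bit_length() minus popcount.
-- outside the precondition, e.g. on magical_num(0): A returns 0, B returns 0
import Mathlib
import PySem

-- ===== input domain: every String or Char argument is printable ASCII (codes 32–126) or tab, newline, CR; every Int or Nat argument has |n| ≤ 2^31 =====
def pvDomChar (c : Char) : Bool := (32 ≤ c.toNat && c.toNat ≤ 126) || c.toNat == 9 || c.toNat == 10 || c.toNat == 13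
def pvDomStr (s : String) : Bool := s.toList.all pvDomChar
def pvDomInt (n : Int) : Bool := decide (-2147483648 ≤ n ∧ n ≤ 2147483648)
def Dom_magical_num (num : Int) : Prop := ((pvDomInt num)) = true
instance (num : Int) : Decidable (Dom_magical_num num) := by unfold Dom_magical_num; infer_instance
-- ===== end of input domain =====

-- B replaces A's per-character weighted-sum loop with an aggregate count: the parity of
-- the weighted bit sum equals the parity of (bit length − popcount); objective: simpler.


-- ===== PORT A =====
-- bin(n) without the "0b" prefix, for n > 0: most-significant digit first
def pvBinDigits : Nat → List Char
  | 0 => []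
  | n+1 => pvBinDigits ((n+1)/2) ++ [if (n+1) % 2 == 1 then '1' else '0']
decreasing_by exact Nat.div_lt_self (Nat.succ_pos n) (by norm_num)

def magical_num (num : Int) : String :=
  if num == 0 then "0"   -- Python A returns the int 0 here (not a string); outside Pre_
  else
    let binary_num : List Char := (if num < 0 then ['-'] else []) ++ pvBinDigits num.natAbs
    let sum : Nat := binary_num.foldl
      (fun s c => if c == '1' then s + 2 else if c == '0' then s + 1 else s) 0
    if sum % 2 == 0 then "Not Magical" else "Magical"

-- ===== PORT B =====
def pvBitLen : Nat → Nat
  | 0 => 0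
  | n+1 => pvBitLen ((n+1)/2) + 1
decreasing_by exact Nat.div_lt_self (Nat.succ_pos n) (by norm_num)

def pvPopCount : Nat → Nat
  | 0 => 0
  | n+1 => pvPopCount ((n+1)/2) + (n+1) % 2
decreasing_by exact Nat.div_lt_self (Nat.succ_pos n) (by norm_num)

def magical_num_alt (num : Int) : String :=
  if num == 0 then "0"   -- Python B returns the int 0 here, like A; outside Pre_
  else
    let zeros : Nat := pvBitLen num.natAbs - pvPopCount num.natAbs
    if zeros % 2 == 1 then "Magical" else "Not Magical"

-- ===== PRECONDITION & SPEC =====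
-- Pre_ excludes num = 0, where the Python returns the integer 0 — not a value of the declared String type.
def Pre_magical_num (num : Int) : Prop := num ≠ 0
instance (num : Int) : Decidable (Pre_magical_num num) := by unfold Pre_magical_num; infer_instance
def pvWitness_magical_num : Int := (5)

def Spec_magical_num (num : Int) (out : String) : Prop := out = magical_num_alt num
instance (num : Int) (out : String) : Decidable (Spec_magical_num num out) := by unfold Spec_magical_num; infer_instance

-- ===== CLAIM (what is proved, stated in full; the proofs are below) =====
def Claim_equal_magical_num : Prop := ∀ (num : Int), Dom_magical_num num → Pre_magical_num num → Spec_magical_num num (magical_num num)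

-- ===== LEMMAS AND PROOFS =====
theorem pvPopCount_le_bitLen : ∀ n, pvPopCount n ≤ pvBitLen n := by
  intro n
  induction n using Nat.strong_induction_on with
  | _ n ih =>
    match n with
    | 0 => simp [pvPopCount, pvBitLen]
    | n+1 =>
      rw [pvPopCount, pvBitLen]
      have h := ih ((n+1)/2) (Nat.div_lt_self (Nat.succ_pos n) (by norm_num))
      have : (n+1) % 2 ≤ 1 := Nat.le_of_lt_succ (Nat.mod_lt _ (by norm_num))
      omega

theorem pvSum_eq : ∀ n s, (pvBinDigits n).foldl
    (fun s c => if c == '1' then s + 2 else if c == '0' then s + 1 else s) s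
    = s + pvBitLen n + pvPopCount n := by
  intro n
  induction n using Nat.strong_induction_on with
  | _ n ih =>
    intro s
    match n with
    | 0 => simp [pvBinDigits, pvBitLen, pvPopCount]
    | n+1 =>
      rw [pvBinDigits, pvBitLen, pvPopCount, List.foldl_append,
        ih ((n+1)/2) (Nat.div_lt_self (Nat.succ_pos n) (by norm_num))]
      rcases Nat.mod_two_eq_zero_or_one (n+1) with h | h <;> simp [h] <;> omega

-- ===== VERDICT (by name: the statement is the Claim_ definition above) =====
theorem pvKeyIf (s b p : Nat) (h : p ≤ b) (hs : s = 0) :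
    (if ((s + b + p) % 2 == 0) = true then "Not Magical" else "Magical")
      = (if ((b - p) % 2 == 1) = true then "Magical" else "Not Magical") := by
  subst hs
  split <;> rename_i hA <;> split <;> rename_i hB <;>
    first | rfl | (exfalso; simp at hA hB; omega)

theorem magical_num_spec : Claim_equal_magical_num := by
  intro num _ hpre
  unfold Spec_magical_num magical_num magical_num_alt
  have h0 : ¬ (num == 0) = true := by simpa using hpre
  have hle := pvPopCount_le_bitLen num.natAbs
  simp only [h0, if_false, Bool.false_eq_true]
  split <;> rename_i hneg <;>
    simp only [List.cons_append, List.nil_append, List.foldl_cons, pvSum_eq] <;>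
    exact pvKeyIf _ _ _ hle rfl
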